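-- pv_equiv track=rewrite | github.com/geekynerdbiker/outsourcing | Done/python-workspace/python-alg_hard/prob2.py | solve
-- ===== SOURCE A (Python) =====
-- def solve(n, s):
--     ans = [0] * (n + 1)
--
--     for k in range(1, n + 1):
--         for l in range(1, k + 1):
--             p = set()
--             for i in range(n - k + 1):
--                 mer = s[i:i + k]
--                 min_sub = mer[:l]
--                 for j in range(1, k - l + 1):
--                     sub = mer[j:j + l]
--                     if sub < min_sub:
--                         min_sub = sub
--                 loc = mer.find(min_sub)
--                 p.add(i + loc)
--             ans[len(p)] += 1
--     return ans
-- ===== SOURCE B (Python) =====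
-- def solve(n, s):
--     ans = [0] * (n + 1)
--     for l in range(1, n + 1):
--         locs = [set() for _ in range(n + 1)]
--         for i in range(n - l + 1):
--             best = i
--             locs[l].add(i)
--             for k in range(l + 1, n - i + 1):
--                 j = i + k - l
--                 if s[j:j + l] < s[best:best + l]:
--                     best = j
--                 locs[k].add(best)
--         for k in range(l, n + 1):
--             ans[len(locs[k])] += 1
--     return ans
-- ===== Notes on version B (the rewrite author's own statement) =====
-- stated objective: faster
-- what changed: Instead of recomputing, for every (k,l,window) triple, the minimal length-l substring by a full rescan and then locating it with str.find, B fixes l, and for each start i grows the window one step at a time, maintaining the leftmost argmin with a single comparison per extension and marking it in a per-k set; the histogram is filled per (l,k) instead of per (k,l); intended as faster (O(n^3) instead of O(n^4) comparisons) — a timing run measured ~8x at the largest size both finished, unconfirmed beyond (both time out).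
-- outside the precondition, e.g. on solve(3, 'a'): A returns [0, 3, 2, 1], B returns [0, 4, 1, 1]; on solve(5, 'ab'): A returns [0, 5, 4, 3, 2, 1], B returns [0, 8, 3, 2, 1, 1]
import Mathlib
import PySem

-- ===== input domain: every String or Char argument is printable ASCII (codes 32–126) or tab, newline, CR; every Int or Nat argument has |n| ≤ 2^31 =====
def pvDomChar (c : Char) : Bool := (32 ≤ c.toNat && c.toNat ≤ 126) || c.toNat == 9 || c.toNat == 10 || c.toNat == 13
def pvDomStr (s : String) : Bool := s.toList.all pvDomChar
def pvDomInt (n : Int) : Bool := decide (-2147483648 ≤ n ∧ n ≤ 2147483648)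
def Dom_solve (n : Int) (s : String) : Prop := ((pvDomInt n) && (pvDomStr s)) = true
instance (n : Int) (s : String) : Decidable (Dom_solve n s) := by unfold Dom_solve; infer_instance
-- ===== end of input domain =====

-- B replaces A's per-window rescan (min over all length-l substrings, then str.find) by
-- extending each window's leftmost-argmin incrementally as the window grows (one comparison
-- per extension); intended as faster (fewer comparisons): a timing run read ~8x at the
-- largest size where both finished.

-- ===== PORT A =====
def solve (n : Int) (s : String) : List Int :=
  let ans : List Int := List.replicate (n + 1).toNat 0
  (PySem.List.pyRange 1 (n + 1)).foldl (fun ans k =>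
    (PySem.List.pyRange 1 (k + 1)).foldl (fun ans l =>
      let p : PySem.Set Int :=
        (PySem.List.pyRange 0 (n - k + 1)).foldl (fun p i =>
          let mer := PySem.Str.slice s (some i) (some (i + k))
          let min_sub := PySem.Str.slice mer none (some l)
          let min_sub := (PySem.List.pyRange 1 (k - l + 1)).foldl (fun min_sub j =>
            let sub := PySem.Str.slice mer (some j) (some (j + l))
            if sub < min_sub then sub else min_sub) min_sub
          let loc := PySem.Str.find mer min_sub
          p.add (i + loc)) PySem.Set.empty
      PySem.List.pySetD ans (PySem.Set.len p) (PySem.List.pyGetD ans (PySem.Set.len p) 0 + 1)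
    ) ans) ans

-- ===== PORT B =====
def solve_alt (n : Int) (s : String) : List Int :=
  let ans : List Int := List.replicate (n + 1).toNat 0
  (PySem.List.pyRange 1 (n + 1)).foldl (fun ans l =>
    let locs : List (PySem.Set Int) := List.replicate (n + 1).toNat PySem.Set.empty
    let locs := (PySem.List.pyRange 0 (n - l + 1)).foldl (fun locs i =>
      let best : Int := i
      let locs := PySem.List.pySetD locs l ((PySem.List.pyGetD locs l PySem.Set.empty).add i)
      let st := (PySem.List.pyRange (l + 1) (n - i + 1)).foldl
        (fun (st : Int × List (PySem.Set Int)) k =>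
          let j := i + k - l
          let best := if PySem.Str.slice s (some j) (some (j + l)) <
                         PySem.Str.slice s (some st.1) (some (st.1 + l)) then j else st.1
          (best, PySem.List.pySetD st.2 k ((PySem.List.pyGetD st.2 k PySem.Set.empty).add best)))
        (best, locs)
      st.2) locs
    (PySem.List.pyRange l (n + 1)).foldl (fun ans k =>
      let c := PySem.Set.len (PySem.List.pyGetD locs k PySem.Set.empty)
      PySem.List.pySetD ans c (PySem.List.pyGetD ans c 0 + 1)) ans) ans

-- ===== PRECONDITION & SPEC =====
-- Pre_ excludes n > len(s) (on which A still returns): there A's window slices silently clamp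
-- at the end of the string, an accident of slicing outside the problem's natural domain n = len(s).
def Pre_solve (n : Int) (s : String) : Prop := n ≤ (s.toList.length : Int)
instance (n : Int) (s : String) : Decidable (Pre_solve n s) := by unfold Pre_solve; infer_instance
def pvWitness_solve : Int × String := (3, "aba")

def Spec_solve (n : Int) (s : String) (out : List Int) : Prop := out = solve_alt n s
instance (n : Int) (s : String) (out : List Int) : Decidable (Spec_solve n s out) := by unfold Spec_solve; infer_instance

-- ===== CLAIM (what is proved, stated in full; the proofs are below) =====
def Claim_equal_solve : Prop := ∀ (n : Int) (s : String), Dom_solve n s → Pre_solve n s → Spec_solve n s (solve n s)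

-- ===== LEMMAS AND PROOFS =====

-- the length-l substring of cs starting at a
def subw (cs : List Char) (l a : Nat) : List Char := (cs.drop a).take l

-- leftmost argmin of subw over positions i..i+d
def argm (cs : List Char) (l i : Nat) : Nat → Nat
  | 0 => i
  | d+1 => if subw cs l (i+d+1) < subw cs l (argm cs l i d) then i+d+1 else argm cs l i d

-- the set of distinct leftmost-argmin positions for window length k, substring length l
def cset (cs : List Char) (m k l : Nat) : PySem.Set Int :=
  PySem.Set.ofList ((List.range (m + 1 - k)).map (fun i => ((argm cs l i (k - l) : Nat) : Int)))

def bump (a : List Int) (c : Int) : List Int :=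
  PySem.List.pySetD a c (PySem.List.pyGetD a c 0 + 1)

def rowP (m : Nat) : List (Int × Int) :=
  (PySem.List.pyRange 1 ((m:Int) + 1)).flatMap (fun k =>
    (PySem.List.pyRange 1 (k + 1)).map (fun l => (k, l)))

def colP (m : Nat) : List (Int × Int) :=
  (PySem.List.pyRange 1 ((m:Int) + 1)).flatMap (fun l =>
    (PySem.List.pyRange l ((m:Int) + 1)).map (fun k => (k, l)))

def histStep (cs : List Char) (m : Nat) (a : List Int) (p : Int × Int) : List Int :=
  bump a (PySem.Set.len (cset cs m p.1.toNat p.2.toNat))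

theorem pyRange_eq_map (a b : Int) :
    PySem.List.pyRange a b = (List.range (b - a).toNat).map (fun e : Nat => a + (e : Int)) := by
  apply List.ext_getElem
  · simp [PySem.List.length_pyRange_one]
  · intro i h1 h2
    simp [PySem.List.getElem_pyRange_one]

theorem argm_ge (cs : List Char) (l i d : Nat) : i ≤ argm cs l i d := by
  induction d with
  | zero => simp [argm]
  | succ d ih => simp only [argm]; split <;> omega
theorem argm_le (cs : List Char) (l i d : Nat) : argm cs l i d ≤ i + d := by
  induction d with
  | zero => simp [argm]
  | succ d ih => simp only [argm]; split <;> omega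
theorem argm_min (cs : List Char) (l i d : Nat) :
    ∀ a, i ≤ a → a ≤ i + d → subw cs l (argm cs l i d) ≤ subw cs l a := by
  induction d with
  | zero => intro a h1 h2; have : a = i := by omega
            simp [argm, this]
  | succ d ih =>
    intro a h1 h2
    simp only [argm]; split
    · rename_i hlt
      rcases Nat.lt_or_ge a (i+d+1) with hc | hc
      · exact le_trans (le_of_lt hlt) (ih a h1 (by omega))
      · have : a = i+d+1 := by omega
        simp [this]
    · rename_i hlt
      rcases Nat.lt_or_ge a (i+d+1) with hc | hc
      · exact ih a h1 (by omega)
      · have : a = i+d+1 := by omega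
        rw [this]; exact le_of_not_gt hlt
theorem argm_strict (cs : List Char) (l i d : Nat) :
    ∀ a, i ≤ a → a < argm cs l i d → subw cs l (argm cs l i d) < subw cs l a := by
  induction d with
  | zero => intro a h1 h2; simp only [argm] at h2; exact absurd h2 (by omega)
  | succ d ih =>
    intro a h1 h2
    by_cases hc : subw cs l (i+d+1) < subw cs l (argm cs l i d)
    · simp only [argm, if_pos hc] at h2 ⊢
      exact lt_of_lt_of_le hc (argm_min cs l i d a h1 (by omega))
    · simp only [argm, if_neg hc] at h2 ⊢
      exact ih a h1 h2
-- mer as char list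
theorem mer_toList (s : String) (i k : Nat) :
    (PySem.Str.slice s (some (i:Int)) (some ((i:Int)+(k:Int)))).toList
      = (s.toList.drop i).take k := by
  rw [PySem.Str.toList_slice, PySem.Chars.slice_eq_listSlice, PySem.List.slice_natCast_add]

-- subw as prefix of a drop of mer
theorem drop_mer (cs : List Char) (i k q : Nat) :
    ((cs.drop i).take k).drop q = (cs.drop (i+q)).take (k-q) := by
  rw [List.drop_take, List.drop_drop]

theorem take_mer (cs : List Char) (i k q l : Nat) (h : q + l ≤ k) :
    (((cs.drop i).take k).drop q).take l = subw cs l (i+q) := by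
  rw [drop_mer, List.take_take, Nat.min_eq_left (by omega), subw]

theorem length_subw (cs : List Char) (l b : Nat) (h : b + l ≤ cs.length) :
    (subw cs l b).length = l := by
  simp [subw]; omega

theorem find_argm (cs : List Char) (i k l : Nat) (hlk : l ≤ k)
    (hik : i + k ≤ cs.length) :
    PySem.Chars.find ((cs.drop i).take k) (subw cs l (argm cs l i (k-l)))
      = ((argm cs l i (k-l) - i : Nat) : Int) := by
  set b := argm cs l i (k-l) with hb
  have hbi : i ≤ b := argm_ge cs l i (k-l)
  have hble : b ≤ i + (k-l) := argm_le cs l i (k-l)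
  set q : Nat := b - i with hq
  set merL := (cs.drop i).take k with hmer
  have hql : q + l ≤ k := by omega
  have hlen : (subw cs l b).length = l := length_subw cs l b (by omega)
  -- occurrence at q
  have hocc : subw cs l b <+: merL.drop q := by
    have : (merL.drop q).take l = subw cs l (i+q) := take_mer cs i k q l hql
    have hbq : i + q = b := by omega
    rw [hbq] at this
    rw [← this]
    exact List.take_prefix _ _
  -- no earlier occurrence
  have hnolt : ∀ q' < q, ¬ subw cs l b <+: merL.drop q' := by
    intro q' hq' hpre
    have hq'l : q' + l ≤ k := by omega
    have : subw cs l b = (merL.drop q').take l := by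
      have := List.prefix_iff_eq_take.mp hpre
      rwa [hlen] at this
    rw [take_mer cs i k q' l hq'l] at this
    have hstr := argm_strict cs l i (k-l) (i+q') (by omega) (by omega)
    rw [← hb, ← this] at hstr
    exact lt_irrefl _ hstr
  have h0 : 0 ≤ PySem.Chars.find merL (subw cs l b) := by
    rw [PySem.Chars.find_nonneg_iff]
    exact (hocc.isInfix).trans (List.drop_suffix q merL).isInfix
  obtain ⟨hpre, hmin⟩ := PySem.Chars.find_spec h0
  have heq : (PySem.Chars.find merL (subw cs l b)).toNat = q := by
    apply le_antisymm
    · by_contra hcon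
      exact (hmin q (by omega)) hocc
    · by_contra hcon
      exact hnolt _ (by omega) hpre
  omega

theorem minfold (s : String) (i k l : Nat) (hlk : l ≤ k) :
    ∀ d, d ≤ k - l →
    ((List.range d).foldl
      (fun ms (e : Nat) =>
        let sub := PySem.Str.slice (PySem.Str.slice s (some (i:Int)) (some ((i:Int)+(k:Int))))
          (some ((1:Int)+(e:Int))) (some ((1:Int)+(e:Int)+(l:Int)))
        if sub < ms then sub else ms)
      (PySem.Str.slice (PySem.Str.slice s (some (i:Int)) (some ((i:Int)+(k:Int)))) none (some (l:Int)))).toList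
      = subw s.toList l (argm s.toList l i d) := by
  intro d
  induction d with
  | zero =>
    intro _
    simp only [List.range_zero, List.foldl_nil, argm]
    rw [PySem.Str.toList_slice, PySem.Chars.slice_eq_listSlice]
    rw [show ((l:Nat):Int) = ((l:Nat):Int) from rfl]
    rw [PySem.List.slice_to_natCast]
    rw [mer_toList, List.take_take, Nat.min_eq_left hlk, subw]
  | succ d ih =>
    intro hd
    rw [List.range_succ, List.foldl_append, List.foldl_cons, List.foldl_nil]
    set ms := (List.range d).foldl _ _ with hms
    have ihh := ih (by omega)
    have hsub : (PySem.Str.slice (PySem.Str.slice s (some (i:Int)) (some ((i:Int)+(k:Int))))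
        (some ((1:Int)+(d:Int))) (some ((1:Int)+(d:Int)+(l:Int)))).toList
        = subw s.toList l (i+d+1) := by
      rw [PySem.Str.toList_slice, PySem.Chars.slice_eq_listSlice]
      have c1 : ((1:Int)+(d:Int)) = (((1+d : Nat)):Int) := by push_cast; ring
      rw [c1, PySem.List.slice_natCast_add, mer_toList]
      rw [take_mer s.toList i k (1+d) l (by omega)]
      congr 1
      omega
    simp only []
    by_cases hc : subw s.toList l (i+d+1) < subw s.toList l (argm s.toList l i d)
    · have : PySem.Str.slice (PySem.Str.slice s (some (i:Int)) (some ((i:Int)+(k:Int))))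
          (some ((1:Int)+(d:Int))) (some ((1:Int)+(d:Int)+(l:Int))) < ms := by
        rw [String.lt_iff_toList_lt, hsub, ihh]; exact hc
      rw [if_pos this, hsub]
      simp only [argm, if_pos hc]
    · have : ¬ (PySem.Str.slice (PySem.Str.slice s (some (i:Int)) (some ((i:Int)+(k:Int))))
          (some ((1:Int)+(d:Int))) (some ((1:Int)+(d:Int)+(l:Int))) < ms) := by
        rw [String.lt_iff_toList_lt, hsub, ihh]; exact hc
      rw [if_neg this, ihh]
      simp only [argm, if_neg hc]

theorem windowA (s : String) (i k l : Nat) (hlk : l ≤ k)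
    (hik : i + k ≤ s.toList.length) :
    (i : Int) + PySem.Str.find
      (PySem.Str.slice s (some (i:Int)) (some ((i:Int)+(k:Int))))
      ((List.range (k-l)).foldl
        (fun ms (e : Nat) =>
          let sub := PySem.Str.slice (PySem.Str.slice s (some (i:Int)) (some ((i:Int)+(k:Int))))
            (some ((1:Int)+(e:Int))) (some ((1:Int)+(e:Int)+(l:Int)))
          if sub < ms then sub else ms)
        (PySem.Str.slice (PySem.Str.slice s (some (i:Int)) (some ((i:Int)+(k:Int)))) none (some (l:Int))))
      = ((argm s.toList l i (k-l) : Nat) : Int) := by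
  rw [PySem.Str.find_eq, minfold s i k l hlk (k-l) le_rfl, mer_toList,
      find_argm s.toList i k l hlk hik]
  have := argm_ge s.toList l i (k-l)
  omega

theorem A_pset (s : String) (m k₀ l₀ : Nat) (hmN : m ≤ s.toList.length)
    (hlk : l₀ ≤ k₀) (hkm : k₀ ≤ m) :
    (PySem.List.pyRange 0 ((m:Int) - (k₀:Int) + 1)).foldl
      (fun (p : PySem.Set Int) (i : Int) =>
        let mer := PySem.Str.slice s (some i) (some (i + (k₀:Int)))
        let min_sub := PySem.Str.slice mer none (some (l₀:Int))
        let min_sub := (PySem.List.pyRange 1 ((k₀:Int) - (l₀:Int) + 1)).foldl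
          (fun min_sub j =>
            let sub := PySem.Str.slice mer (some j) (some (j + (l₀:Int)))
            if sub < min_sub then sub else min_sub) min_sub
        let loc := PySem.Str.find mer min_sub
        p.add (i + loc)) PySem.Set.empty
      = cset s.toList m k₀ l₀ := by
  rw [show ((m:Int) - (k₀:Int) + 1) = (((m + 1 - k₀ : Nat)):Int) by omega]
  rw [PySem.List.pyRange_zero, Int.toNat_natCast, List.foldl_map]
  have hcong : ∀ (p : PySem.Set Int), ∀ e ∈ List.range (m + 1 - k₀),
      (fun (p : PySem.Set Int) (e : Nat) =>
        p.add ((e:Int) + PySem.Str.find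
          (PySem.Str.slice s (some (e:Int)) (some ((e:Int) + (k₀:Int))))
          ((PySem.List.pyRange 1 ((k₀:Int) - (l₀:Int) + 1)).foldl
            (fun min_sub j =>
              if PySem.Str.slice (PySem.Str.slice s (some (e:Int)) (some ((e:Int) + (k₀:Int)))) (some j) (some (j + (l₀:Int))) < min_sub
              then PySem.Str.slice (PySem.Str.slice s (some (e:Int)) (some ((e:Int) + (k₀:Int)))) (some j) (some (j + (l₀:Int)))
              else min_sub)
            (PySem.Str.slice (PySem.Str.slice s (some (e:Int)) (some ((e:Int) + (k₀:Int)))) none (some (l₀:Int)))))) p e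
      = p.add ((argm s.toList l₀ e (k₀ - l₀) : Nat) : Int) := by
    intro p e he
    simp only [List.mem_range] at he
    beta_reduce
    congr 1
    rw [pyRange_eq_map 1 ((k₀:Int) - (l₀:Int) + 1), List.foldl_map]
    rw [show (((k₀:Int) - (l₀:Int) + 1) - 1).toNat = k₀ - l₀ by omega]
    exact windowA s e k₀ l₀ hlk (by omega)
  rw [PySem.List.foldl_congr_mem _ _ _ _ hcong]
  rw [show (fun (p : PySem.Set Int) (e : Nat) => p.add ((argm s.toList l₀ e (k₀ - l₀) : Nat) : Int))
      = (fun (p : PySem.Set Int) (e : Nat) =>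
          PySem.Set.add p ((fun i : Nat => ((argm s.toList l₀ i (k₀ - l₀) : Nat) : Int)) e)) from rfl]
  rw [← List.foldl_map]
  rfl

theorem charA (s : String) (m : Nat) (hmN : m ≤ s.toList.length) :
    solve (m : Int) s = (rowP m).foldl (histStep s.toList m) (List.replicate (m + 1) 0) := by
  rw [rowP, List.foldl_flatMap]
  unfold solve
  have hrep : (((m:Int)) + 1).toNat = m + 1 := by omega
  rw [hrep]
  apply PySem.List.foldl_congr_mem
  intro ans k hk
  rw [List.foldl_map]
  apply PySem.List.foldl_congr_mem
  intro ans' l hl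
  rw [PySem.List.mem_pyRange_one] at hk hl
  obtain ⟨k₀, rfl⟩ : ∃ t : Nat, k = (t : Int) := ⟨k.toNat, by omega⟩
  obtain ⟨l₀, rfl⟩ : ∃ t : Nat, l = (t : Int) := ⟨l.toNat, by omega⟩
  show bump ans' _ = histStep s.toList m ans' ((k₀:Int), (l₀:Int))
  unfold histStep
  simp only [Int.toNat_natCast]
  congr 2
  exact A_pset s m k₀ l₀ hmN (by omega) (by omega)


def kstep (s : String) (l₀ i : Nat) (st : Int × List (PySem.Set Int)) (e : Nat) :
    Int × List (PySem.Set Int) :=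
  let j := (i:Int) + (((l₀:Int) + 1) + (e:Int)) - (l₀:Int)
  let best := if PySem.Str.slice s (some j) (some (j + (l₀:Int))) <
                 PySem.Str.slice s (some st.1) (some (st.1 + (l₀:Int))) then j else st.1
  (best, PySem.List.pySetD st.2 (((l₀:Int) + 1) + (e:Int))
    ((PySem.List.pyGetD st.2 (((l₀:Int) + 1) + (e:Int)) PySem.Set.empty).add best))

theorem B_kfold (s : String) (l₀ i : Nat) (L : List (PySem.Set Int)) (d : Nat) :
    (((List.range d).foldl (kstep s l₀ i) ((i:Int), L)).1
        = ((argm s.toList l₀ i d : Nat) : Int))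
    ∧ ((List.range d).foldl (kstep s l₀ i) ((i:Int), L)).2.length = L.length
    ∧ ∀ q : Nat, (((List.range d).foldl (kstep s l₀ i) ((i:Int), L)).2)[q]? =
      if l₀+1 ≤ q ∧ q ≤ l₀+d then
        (L[q]?).map (fun t => t.add ((argm s.toList l₀ i (q-l₀) : Nat) : Int))
      else L[q]? := by
  induction d with
  | zero =>
    refine ⟨by simp [argm], rfl, ?_⟩
    intro q
    rw [if_neg (by omega)]
    simp
  | succ d ih =>
    obtain ⟨ih1, ihlen, ih2⟩ := ih
    rw [List.range_succ, List.foldl_append, List.foldl_cons, List.foldl_nil]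
    set st := (List.range d).foldl (kstep s l₀ i) ((i:Int), L) with hst
    have hj : (i:Int) + (((l₀:Int) + 1) + (d:Int)) - (l₀:Int) = (((i+d+1 : Nat)):Int) := by
      push_cast; ring
    have hcond : (PySem.Str.slice s (some ((i:Int) + (((l₀:Int) + 1) + (d:Int)) - (l₀:Int)))
          (some (((i:Int) + (((l₀:Int) + 1) + (d:Int)) - (l₀:Int)) + (l₀:Int))) <
        PySem.Str.slice s (some st.1) (some (st.1 + (l₀:Int))))
        ↔ subw s.toList l₀ (i+d+1) < subw s.toList l₀ (argm s.toList l₀ i d) := by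
      rw [hj, ih1, String.lt_iff_toList_lt, mer_toList, mer_toList]
      exact Iff.rfl
    have hbest : (if PySem.Str.slice s (some ((i:Int) + (((l₀:Int) + 1) + (d:Int)) - (l₀:Int)))
          (some (((i:Int) + (((l₀:Int) + 1) + (d:Int)) - (l₀:Int)) + (l₀:Int))) <
        PySem.Str.slice s (some st.1) (some (st.1 + (l₀:Int))) then
          (i:Int) + (((l₀:Int) + 1) + (d:Int)) - (l₀:Int) else st.1)
        = ((argm s.toList l₀ i (d+1) : Nat) : Int) := by
      by_cases hc : subw s.toList l₀ (i+d+1) < subw s.toList l₀ (argm s.toList l₀ i d)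
      · rw [if_pos (hcond.mpr hc), hj]
        simp only [argm, if_pos hc]
      · rw [if_neg (fun h => hc (hcond.mp h)), ih1]
        simp only [argm, if_neg hc]
    have hkidx : ((l₀:Int) + 1) + (d:Int) = (((l₀+1+d : Nat)):Int) := by push_cast; ring
    refine ⟨?_, ?_, ?_⟩
    · simp only [kstep]
      rw [hbest]
    · simp only [kstep]
      rw [hkidx, PySem.List.pySetD_natCast, List.length_set]
      exact ihlen
    · intro q
      simp only [kstep]
      rw [hbest, hkidx, PySem.List.pySetD_natCast, PySem.List.pyGetD_natCast]
      rw [List.getElem?_set]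
      by_cases hq : l₀+1+d = q
      · subst hq
        rw [if_pos rfl]
        by_cases hin : l₀+1+d < st.2.length
        · rw [if_pos hin, List.getD_eq_getElem?_getD, ih2 (l₀+1+d), if_neg (by omega),
              show l₀+1+d-l₀ = d+1 by omega, if_pos (by omega : l₀+1 ≤ l₀+1+d ∧ l₀+1+d ≤ l₀+(d+1))]
          have hx : L[l₀+1+d]? = some (L[l₀+1+d]'(by omega)) :=
            List.getElem?_eq_getElem (by omega)
          rw [hx]
          rfl
        · rw [if_neg hin, if_pos (by omega : l₀+1 ≤ l₀+1+d ∧ l₀+1+d ≤ l₀+(d+1))]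
          have hx : L[l₀+1+d]? = none := by
            rw [List.getElem?_eq_none_iff]
            omega
          rw [hx]
          rfl
      · rw [if_neg hq, ih2 q]
        by_cases hq2 : l₀+1 ≤ q ∧ q ≤ l₀+d
        · rw [if_pos hq2, if_pos (by omega)]
        · rw [if_neg hq2, if_neg (by omega)]

def istep (s : String) (m l₀ : Nat) (locs : List (PySem.Set Int)) (i : Nat) :
    List (PySem.Set Int) :=
  ((List.range (m - l₀ - i)).foldl (kstep s l₀ i)
    ((i:Int), PySem.List.pySetD locs (l₀:Int)
      ((PySem.List.pyGetD locs (l₀:Int) PySem.Set.empty).add (i:Int)))).2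

theorem ofList_snoc {α : Type} [BEq α] (xs : List α) (x : α) :
    PySem.Set.ofList (xs ++ [x]) = (PySem.Set.ofList xs).add x := by
  simp [PySem.Set.ofList, List.foldl_append]

theorem B_ifold (s : String) (m l₀ : Nat) (hl : 1 ≤ l₀) (hlm : l₀ ≤ m) :
    ∀ t, t ≤ m + 1 - l₀ →
    ((List.range t).foldl (istep s m l₀) (List.replicate (m+1) PySem.Set.empty)).length = m + 1
    ∧ ∀ q, l₀ ≤ q → q ≤ m →
      ((List.range t).foldl (istep s m l₀) (List.replicate (m+1) PySem.Set.empty))[q]? =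
        some (PySem.Set.ofList ((List.range (min t (m+1-q))).map
          (fun i : Nat => ((argm s.toList l₀ i (q-l₀) : Nat) : Int)))) := by
  intro t
  induction t with
  | zero =>
    intro _
    refine ⟨by simp, ?_⟩
    intro q hq1 hq2
    simp only [List.range_zero, List.foldl_nil, Nat.min_eq_left (by omega : 0 ≤ m+1-q)]
    rw [List.getElem?_eq_getElem (by simp; omega)]
    simp [PySem.Set.ofList, PySem.Set.empty]
  | succ t ih =>
    intro ht
    obtain ⟨ihlen, ihq⟩ := ih (by omega)
    rw [List.range_succ, List.foldl_append, List.foldl_cons, List.foldl_nil]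
    set res := (List.range t).foldl (istep s m l₀) (List.replicate (m+1) PySem.Set.empty)
      with hres
    -- the entry l₀ before this iteration
    have hresl : res[l₀]? = some (PySem.Set.ofList ((List.range (min t (m+1-l₀))).map
        (fun i : Nat => ((argm s.toList l₀ i (l₀-l₀) : Nat) : Int)))) := ihq l₀ le_rfl hlm
    have hmint : min t (m+1-l₀) = t := by omega
    -- L' after the set at l₀
    have hL : ∀ q : Nat,
        (PySem.List.pySetD res (l₀:Int)
          ((PySem.List.pyGetD res (l₀:Int) PySem.Set.empty).add (t:Int)))[q]? =
        if q = l₀ then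
          some ((PySem.Set.ofList ((List.range t).map
            (fun i : Nat => ((argm s.toList l₀ i (l₀-l₀) : Nat) : Int)))).add (t:Int))
        else res[q]? := by
      intro q
      rw [PySem.List.pySetD_natCast, PySem.List.pyGetD_natCast, List.getElem?_set]
      by_cases hq : l₀ = q
      · subst hq
        rw [if_pos rfl, if_pos rfl, if_pos (by omega), List.getD_eq_getElem?_getD, hresl,
            hmint]
        rfl
      · rw [if_neg hq, if_neg (fun h => hq h.symm)]
    obtain ⟨_, klen, kq⟩ := B_kfold s l₀ t
      (PySem.List.pySetD res (l₀:Int)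
        ((PySem.List.pyGetD res (l₀:Int) PySem.Set.empty).add (t:Int))) (m - l₀ - t)
    constructor
    · show (istep s m l₀ res t).length = m + 1
      unfold istep
      rw [klen, PySem.List.pySetD_natCast, List.length_set, ihlen]
    · intro q hq1 hq2
      show (istep s m l₀ res t)[q]? = _
      unfold istep
      rw [kq q, hL q]
      by_cases hql : q = l₀
      · subst hql
        rw [if_neg (by omega), if_pos rfl]
        congr 1
        rw [show min (t+1) (m+1-q) = t+1 by omega, List.range_succ]
        simp [ofList_snoc, argm]
      · by_cases hwin : l₀+1 ≤ q ∧ q ≤ l₀+(m-l₀-t)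
        · rw [if_pos hwin, if_neg hql, ihq q hq1 hq2,
              show min t (m+1-q) = t by omega]
          simp only [Option.map_some]
          congr 1
          rw [show min (t+1) (m+1-q) = t+1 by omega, List.range_succ]
          simp [ofList_snoc]
        · rw [if_neg hwin, if_neg hql, ihq q hq1 hq2,
              show min t (m+1-q) = min (t+1) (m+1-q) by omega]

theorem charB (s : String) (m : Nat) :
    solve_alt (m : Int) s = (colP m).foldl (histStep s.toList m) (List.replicate (m + 1) 0) := by
  rw [colP, List.foldl_flatMap]
  unfold solve_alt
  have hrep : (((m:Int)) + 1).toNat = m + 1 := by omega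
  rw [hrep]
  apply PySem.List.foldl_congr_mem
  intro ans l hlmem
  rw [List.foldl_map]
  rw [PySem.List.mem_pyRange_one] at hlmem
  obtain ⟨l₀, rfl⟩ : ∃ t : Nat, l = (t : Int) := ⟨l.toNat, by omega⟩
  have hl1 : 1 ≤ l₀ := by omega
  have hlm : l₀ ≤ m := by omega
  change (PySem.List.pyRange ((l₀:Int)) ((m:Int) + 1)).foldl
      (fun ans k =>
        PySem.List.pySetD ans ((PySem.List.pyGetD ((PySem.List.pyRange 0 ((m:Int) - (l₀:Int) + 1)).foldl
        (fun (locs : List (PySem.Set Int)) (i : Int) =>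
          ((PySem.List.pyRange ((l₀:Int) + 1) ((m:Int) - i + 1)).foldl
            (fun (st : Int × List (PySem.Set Int)) k =>
              let j := i + k - (l₀:Int)
              let best := if PySem.Str.slice s (some j) (some (j + (l₀:Int))) <
                  PySem.Str.slice s (some st.1) (some (st.1 + (l₀:Int))) then j else st.1
              (best, PySem.List.pySetD st.2 k
                ((PySem.List.pyGetD st.2 k PySem.Set.empty).add best)))
            (i, PySem.List.pySetD locs (l₀:Int)
              ((PySem.List.pyGetD locs (l₀:Int) PySem.Set.empty).add i))).2)
        (List.replicate (m+1) PySem.Set.empty)) k PySem.Set.empty).len)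
          (PySem.List.pyGetD ans ((PySem.List.pyGetD ((PySem.List.pyRange 0 ((m:Int) - (l₀:Int) + 1)).foldl
        (fun (locs : List (PySem.Set Int)) (i : Int) =>
          ((PySem.List.pyRange ((l₀:Int) + 1) ((m:Int) - i + 1)).foldl
            (fun (st : Int × List (PySem.Set Int)) k =>
              let j := i + k - (l₀:Int)
              let best := if PySem.Str.slice s (some j) (some (j + (l₀:Int))) <
                  PySem.Str.slice s (some st.1) (some (st.1 + (l₀:Int))) then j else st.1
              (best, PySem.List.pySetD st.2 k
                ((PySem.List.pyGetD st.2 k PySem.Set.empty).add best)))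
            (i, PySem.List.pySetD locs (l₀:Int)
              ((PySem.List.pyGetD locs (l₀:Int) PySem.Set.empty).add i))).2)
        (List.replicate (m+1) PySem.Set.empty)) k PySem.Set.empty).len) 0 + 1))
      ans = _
  have hlocs :
      (PySem.List.pyRange 0 ((m:Int) - (l₀:Int) + 1)).foldl
        (fun (locs : List (PySem.Set Int)) (i : Int) =>
          ((PySem.List.pyRange ((l₀:Int) + 1) ((m:Int) - i + 1)).foldl
            (fun (st : Int × List (PySem.Set Int)) k =>
              let j := i + k - (l₀:Int)
              let best := if PySem.Str.slice s (some j) (some (j + (l₀:Int))) <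
                  PySem.Str.slice s (some st.1) (some (st.1 + (l₀:Int))) then j else st.1
              (best, PySem.List.pySetD st.2 k
                ((PySem.List.pyGetD st.2 k PySem.Set.empty).add best)))
            (i, PySem.List.pySetD locs (l₀:Int)
              ((PySem.List.pyGetD locs (l₀:Int) PySem.Set.empty).add i))).2)
        (List.replicate (m+1) PySem.Set.empty)
      = (List.range (m+1-l₀)).foldl (istep s m l₀) (List.replicate (m+1) PySem.Set.empty) := by
    rw [show ((m:Int) - (l₀:Int) + 1) = (((m + 1 - l₀ : Nat)):Int) by omega]
    rw [PySem.List.pyRange_zero, Int.toNat_natCast, List.foldl_map]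
    apply PySem.List.foldl_congr_mem
    intro locs i hi
    simp only [List.mem_range] at hi
    show _ = istep s m l₀ locs i
    unfold istep
    rw [pyRange_eq_map ((l₀:Int) + 1) ((m:Int) - ((i:Nat):Int) + 1), List.foldl_map]
    rw [show (((m:Int) - ((i:Nat):Int) + 1) - ((l₀:Int) + 1)).toNat = m - l₀ - i by omega]
    rfl
  rw [hlocs]
  apply PySem.List.foldl_congr_mem
  intro a k hkmem
  rw [PySem.List.mem_pyRange_one] at hkmem
  obtain ⟨k₀, rfl⟩ : ∃ t : Nat, k = (t : Int) := ⟨k.toNat, by omega⟩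
  obtain ⟨_, hq⟩ := B_ifold s m l₀ hl1 hlm (m+1-l₀) le_rfl
  have hget : PySem.List.pyGetD
      ((List.range (m+1-l₀)).foldl (istep s m l₀) (List.replicate (m+1) PySem.Set.empty))
      ((k₀:Nat):Int) PySem.Set.empty = cset s.toList m k₀ l₀ := by
    rw [PySem.List.pyGetD_natCast, List.getD_eq_getElem?_getD, hq k₀ (by omega) (by omega)]
    rw [show min (m+1-l₀) (m+1-k₀) = m+1-k₀ by omega]
    rfl
  rw [hget]
  show bump a _ = histStep s.toList m a (((k₀:Nat):Int), ((l₀:Nat):Int))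
  unfold histStep
  simp only [Int.toNat_natCast]

theorem bump_natCast (a : List Int) (t : Nat) :
    bump a (t : Int) = a.set t (a.getD t 0 + 1) := by
  simp [bump, PySem.List.pySetD_natCast, PySem.List.pyGetD_natCast]

theorem bump_comm (a : List Int) (c₁ c₂ : Int) (h₁ : 0 ≤ c₁) (h₂ : 0 ≤ c₂) :
    bump (bump a c₁) c₂ = bump (bump a c₂) c₁ := by
  obtain ⟨t₁, rfl⟩ : ∃ t : Nat, c₁ = (t : Int) := ⟨c₁.toNat, by omega⟩
  obtain ⟨t₂, rfl⟩ : ∃ t : Nat, c₂ = (t : Int) := ⟨c₂.toNat, by omega⟩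
  rcases eq_or_ne t₁ t₂ with rfl | hne
  · rfl
  · simp only [bump_natCast, List.getD_eq_getElem?_getD, List.getElem?_set,
      if_neg hne, if_neg (Ne.symm hne)]
    rw [List.set_comm _ _ hne]

theorem mem_rowP (m : Nat) (p : Int × Int) :
    p ∈ rowP m ↔ 1 ≤ p.2 ∧ p.2 ≤ p.1 ∧ p.1 ≤ (m : Int) := by
  simp only [rowP, List.mem_flatMap, List.mem_map, PySem.List.mem_pyRange_one]
  constructor
  · rintro ⟨k, ⟨hk1, hk2⟩, l, ⟨hl1, hl2⟩, rfl⟩; exact ⟨hl1, by omega, by omega⟩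
  · rintro ⟨h1, h2, h3⟩
    exact ⟨p.1, ⟨by omega, by omega⟩, p.2, ⟨by omega, by omega⟩, rfl⟩

theorem mem_colP (m : Nat) (p : Int × Int) :
    p ∈ colP m ↔ 1 ≤ p.2 ∧ p.2 ≤ p.1 ∧ p.1 ≤ (m : Int) := by
  simp only [colP, List.mem_flatMap, List.mem_map, PySem.List.mem_pyRange_one]
  constructor
  · rintro ⟨l, ⟨hl1, hl2⟩, k, ⟨hk1, hk2⟩, rfl⟩; exact ⟨hl1, by omega, by omega⟩
  · rintro ⟨h1, h2, h3⟩
    exact ⟨p.2, ⟨by omega, by omega⟩, p.1, ⟨by omega, by omega⟩, rfl⟩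

theorem nodup_rowP (m : Nat) : (rowP m).Nodup := by
  unfold rowP
  rw [List.nodup_flatMap]
  constructor
  · intro k _
    exact List.Nodup.map (fun a b h => by injection h) (PySem.List.nodup_pyRange_one _ _)
  · refine (PySem.List.pairwise_lt_pyRange_one _ _).imp ?_
    intro a b hab p hp hq
    simp only [List.mem_map] at hp hq
    obtain ⟨l1, _, rfl⟩ := hp
    obtain ⟨l2, _, h2⟩ := hq
    exact absurd (congrArg Prod.fst h2).symm (by simpa using ne_of_lt hab)

theorem nodup_colP (m : Nat) : (colP m).Nodup := by
  unfold colP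
  rw [List.nodup_flatMap]
  constructor
  · intro l _
    exact List.Nodup.map (fun a b h => by injection h) (PySem.List.nodup_pyRange_one _ _)
  · refine (PySem.List.pairwise_lt_pyRange_one _ _).imp ?_
    intro a b hab p hp hq
    simp only [List.mem_map] at hp hq
    obtain ⟨k1, _, rfl⟩ := hp
    obtain ⟨k2, _, h2⟩ := hq
    exact absurd (congrArg Prod.snd h2).symm (by simpa using ne_of_lt hab)

theorem perm_rowP_colP (m : Nat) : (rowP m).Perm (colP m) := by
  apply List.perm_of_nodup_nodup_toFinset_eq (nodup_rowP m) (nodup_colP m)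
  ext p
  simp only [List.mem_toFinset, mem_rowP, mem_colP]

-- ===== VERDICT (by name: the statement is the Claim_ definition above) =====
theorem solve_spec : Claim_equal_solve := by
  intro n s _hd hp
  unfold Spec_solve
  rcases le_or_gt n 0 with hn | hn
  · have h1 : PySem.List.pyRange 1 (n + 1) = [] := PySem.List.pyRange_one_eq_nil (by omega)
    simp [solve, solve_alt, h1]
  · have hm : n = ((n.toNat : Nat) : Int) := by omega
    have hmN : n.toNat ≤ s.toList.length := by
      have := hp; unfold Pre_solve at this; omega
    rw [hm, charA s n.toNat hmN, charB s n.toNat]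
    letI : RightCommutative (histStep s.toList n.toNat) := ⟨by
      intro a p q
      exact bump_comm a _ _ (by unfold PySem.Set.len; positivity) (by unfold PySem.Set.len; positivity)⟩
    exact (perm_rowP_colP n.toNat).foldl_eq _
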